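-- pv_equiv track=rewrite | github.com/KeithKola10/comp_bio_proj | GMM.py | label_generator
-- ===== SOURCE A (Python) =====
-- def label_generator(names):
--     mapping = {}
--     counter = 0
--     result = []
--
--     for n in names:
--         if n not in mapping:
--             mapping[n] = counter
--             counter += 1
--         result.append(mapping[n])
--
--     return result, mapping
-- ===== SOURCE B (Python) =====
-- def label_generator(names):
--     # label(n) = number of distinct names appearing before n's first occurrence;
--     # each label is computed independently from the input, no running state.
--     names = list(names)
--     result = [len(set(names[:names.index(n)])) for n in names]
--     return result, dict(zip(names, result))
-- ===== Notes on version B (the rewrite author's own statement) =====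
-- stated objective: simpler
-- what changed: Replaced the stateful single pass (hash map plus running counter) by a stateless per-element closed form: each label is len(set(names[:names.index(n)])), the number of distinct names before the first occurrence, and the mapping is rebuilt afterwards with dict(zip(names, result)); B is quadratic where A is linear.
import Mathlib
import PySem

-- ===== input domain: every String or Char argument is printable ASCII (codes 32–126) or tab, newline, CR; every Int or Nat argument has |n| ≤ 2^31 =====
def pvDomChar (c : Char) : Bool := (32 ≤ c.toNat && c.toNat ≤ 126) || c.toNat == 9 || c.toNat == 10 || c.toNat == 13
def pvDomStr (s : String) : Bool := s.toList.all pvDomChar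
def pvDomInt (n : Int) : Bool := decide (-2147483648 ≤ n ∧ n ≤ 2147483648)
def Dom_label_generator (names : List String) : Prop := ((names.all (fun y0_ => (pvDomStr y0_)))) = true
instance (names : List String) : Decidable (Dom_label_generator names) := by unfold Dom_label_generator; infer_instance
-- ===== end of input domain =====

-- B replaces A's stateful pass (hash map + running counter) by a stateless per-element
-- closed form — label(n) = len(set(names[:names.index(n)])) — plus dict(zip(names, result));
-- simpler to read, quadratic where A is linear.

-- ===== PORT A =====
-- one iteration of A's 'for n in names' loop over the state (mapping, counter, result)
def labelStep (s : PySem.Dict String Int × Int × List Int) (n : String) :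
    PySem.Dict String Int × Int × List Int :=
  let dc := if s.1.contains n then (s.1, s.2.1) else (s.1.insert n s.2.1, s.2.1 + 1)
  -- result.append(mapping[n]): n is a key of the updated mapping here, so getD is exact
  (dc.1, dc.2, s.2.2 ++ [dc.1.getD n 0])

def label_generator (names : List String) : List Int × (List (String × Int)) :=
  let st := names.foldl labelStep (PySem.Dict.empty, 0, [])
  (st.2.2, st.1.items)

-- ===== PORT B =====
-- len(set(names[:names.index(n)])): n is drawn from names, so index? is some — getD 0 is exact
def bLabel (names : List String) (n : String) : Int :=
  ((PySem.Set.ofList (PySem.List.slice names none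
      (some (((PySem.List.index? names n).getD 0 : Nat) : Int)))).length : Int)

def label_generator_alt (names : List String) : List Int × (List (String × Int)) :=
  let result := names.map (bLabel names)
  (result, (PySem.Dict.ofList (names.zip result)).items)

-- ===== PRECONDITION & SPEC =====
def Spec_label_generator (names : List String) (out : List Int × (List (String × Int))) : Prop := out = label_generator_alt names
instance (names : List String) (out : List Int × (List (String × Int))) : Decidable (Spec_label_generator names out) := by unfold Spec_label_generator; infer_instance

-- ===== CLAIM (what is proved, stated in full; the proofs are below) =====
def Claim_equal_label_generator : Prop := ∀ (names : List String), Dom_label_generator names → Spec_label_generator names (label_generator names)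

-- ===== LEMMAS AND PROOFS =====

-- A's mapping after processing a prefix p, in closed form (first occurrences, enumerated)
def dmOf (p : List String) : PySem.Dict String Int :=
  PySem.Dict.ofList ((PySem.List.enumerate (PySem.List.dedup p) 0).map (fun q => (q.2, q.1)))

lemma ofList_append_mem {p : List String} {x : String} (hx : x ∈ p) :
    PySem.Set.ofList (p ++ [x]) = PySem.Set.ofList p := by
  rw [PySem.Set.ofList_append_singleton,
      PySem.Set.add_of_mem (((PySem.Set.mem_ofList _ _).mpr hx))]

lemma ofList_append_not_mem {p : List String} {x : String} (hx : x ∉ p) :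
    PySem.Set.ofList (p ++ [x]) = PySem.Set.ofList p ++ [x] := by
  rw [PySem.Set.ofList_append_singleton,
      PySem.Set.add_of_not_mem (fun h => hx (((PySem.Set.mem_ofList _ _).mp h)))]

lemma dict_ofList_append_singleton (L : List (String × Int)) (k : String) (v : Int) :
    PySem.Dict.ofList (L ++ [(k, v)]) = (PySem.Dict.ofList L).insert k v := by
  simp [PySem.Dict.ofList, PySem.Dict.update]

lemma dmOf_append_of_mem {p : List String} {x : String} (hx : x ∈ p) :
    dmOf (p ++ [x]) = dmOf p := by
  simp [dmOf, ofList_append_mem hx]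

lemma dmOf_append_of_not_mem {p : List String} {x : String} (hx : x ∉ p) :
    dmOf (p ++ [x]) = (dmOf p).insert x ((PySem.List.dedup p).length : Int) := by
  simp only [dmOf, PySem.List.dedup_eq_ofList, ofList_append_not_mem hx,
    PySem.List.enumerate_append, List.map_append]
  simp [dict_ofList_append_singleton, PySem.List.enumerate_cons]

lemma contains_dmOf (p : List String) (x : String) :
    (dmOf p).contains x = decide (x ∈ p) := by
  induction p using List.reverseRecOn with
  | nil => simp [dmOf, PySem.Dict.ofList, PySem.Dict.update]
  | append_singleton p y ih =>
    by_cases hy : y ∈ p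
    · rw [dmOf_append_of_mem hy, ih]
      by_cases hxy : x = y <;> simp [hxy, hy]
    · rw [dmOf_append_of_not_mem hy, PySem.Dict.contains_insert, ih]
      by_cases hxy : x = y <;> simp [hxy]

lemma getD_dmOf_append {p : List String} {x : String} (hx : x ∈ p) (q : List String) :
    (dmOf (p ++ q)).getD x 0 = (dmOf p).getD x 0 := by
  induction q using List.reverseRecOn with
  | nil => simp
  | append_singleton q y ih =>
    rw [← List.append_assoc]
    by_cases hy : y ∈ p ++ q
    · rw [dmOf_append_of_mem hy, ih]
    · have hne : x ≠ y := fun h => hy (h ▸ List.mem_append_left q hx)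
      rw [dmOf_append_of_not_mem hy, PySem.Dict.getD_insert, if_neg hne, ih]

lemma labelStep_dmOf (p : List String) (r : List Int) (x : String) :
    labelStep (dmOf p, ((PySem.List.dedup p).length : Int), r) x
      = (dmOf (p ++ [x]), ((PySem.List.dedup (p ++ [x])).length : Int),
         r ++ [(dmOf (p ++ [x])).getD x 0]) := by
  by_cases hx : x ∈ p
  · simp [labelStep, contains_dmOf, hx, dmOf_append_of_mem hx, ofList_append_mem hx]
  · rw [dmOf_append_of_not_mem hx]
    simp only [PySem.List.dedup_eq_ofList, ofList_append_not_mem hx]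
    simp [labelStep, contains_dmOf, hx, PySem.Dict.getD_insert_self]

lemma foldl_labelStep (xs : List String) : ∀ (p : List String) (r : List Int),
    xs.foldl labelStep (dmOf p, ((PySem.List.dedup p).length : Int), r)
      = (dmOf (p ++ xs), ((PySem.List.dedup (p ++ xs)).length : Int),
         r ++ xs.map (fun n => (dmOf (p ++ xs)).getD n 0)) := by
  induction xs with
  | nil => intro p r; simp
  | cons x xs ih =>
    intro p r
    rw [List.foldl_cons, labelStep_dmOf, ih (p ++ [x])]
    have hperm : p ++ [x] ++ xs = p ++ x :: xs := by simp
    have hx : x ∈ p ++ [x] := by simp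
    rw [List.map_cons, hperm, ← hperm, getD_dmOf_append hx xs]
    simp

lemma dmOf_nil : dmOf [] = PySem.Dict.empty := by
  simp [dmOf, PySem.List.dedup, PySem.Dict.ofList, PySem.Dict.update]

-- A's run, in closed form
lemma label_generator_eq (names : List String) :
    label_generator names
      = (names.map (fun n => (dmOf names).getD n 0), (dmOf names).items) := by
  rw [label_generator, ← dmOf_nil]
  have h0 : (0 : Int) = ((PySem.List.dedup ([] : List String)).length : Int) := by
    simp [PySem.List.dedup]
  rw [h0, foldl_labelStep names [] []]
  rfl

-- B-side facts ------------------------------------------------------------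

lemma idxOf_append_self {l : List String} {x : String} (hx : x ∉ l) :
    (l ++ [x]).idxOf x = l.length := by
  induction l with
  | nil => simp
  | cons a l ih =>
    have hax : (a == x) = false := by
      simp only [beq_eq_false_iff_ne]; intro he; exact hx (he ▸ List.mem_cons_self)
    rw [List.cons_append, List.idxOf_cons, hax]
    simp [ih (fun hm => hx (List.mem_cons_of_mem _ hm))]

-- updating a set never moves an element that is already in it
lemma idxOf_update (t : List String) : ∀ (s : PySem.Set String) (n : String), n ∈ s →
    (PySem.Set.update s t).idxOf n = s.idxOf n := by
  induction t with
  | nil => intro s n _; rfl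
  | cons x t ih =>
    intro s n hn
    have hstep : PySem.Set.update s (x :: t) = PySem.Set.update (PySem.Set.add s x) t := by
      simp [PySem.Set.update]
    rw [hstep]
    by_cases hx : x ∈ s
    · rw [PySem.Set.add_of_mem hx, ih s n hn]
    · rw [PySem.Set.add_of_not_mem hx, ih (s ++ [x]) n (List.mem_append_left _ hn),
          List.idxOf_append_of_mem hn]

-- the label of n is its position among the distinct names
lemma getD_dmOf (p : List String) (n : String) (hn : n ∈ p) :
    (dmOf p).getD n 0 = ((PySem.Set.ofList p).idxOf n : Int) := by
  induction p using List.reverseRecOn with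
  | nil => cases hn
  | append_singleton p x ih =>
    by_cases hx : x ∈ p
    · have hn' : n ∈ p := by
        rcases List.mem_append.mp hn with h | h
        · exact h
        · simpa using (by simpa using h : n = x) ▸ hx
      rw [dmOf_append_of_mem hx, ofList_append_mem hx, ih hn']
    · rw [dmOf_append_of_not_mem hx, ofList_append_not_mem hx]
      by_cases hnx : n = x
      · subst hnx
        rw [PySem.Dict.getD_insert_self,
            idxOf_append_self (fun h => hx ((PySem.Set.mem_ofList _ _).mp h))]
        simp [PySem.List.dedup_eq_ofList]
      · have hn' : n ∈ p := by
          rcases List.mem_append.mp hn with h | h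
          · exact h
          · exact absurd (by simpa using h) hnx
        rw [PySem.Dict.getD_insert, if_neg hnx,
            List.idxOf_append_of_mem ((PySem.Set.mem_ofList _ _).mpr hn'), ih hn']

-- that position equals the number of distinct names strictly before n's first occurrence
lemma idxOf_ofList_take {p : List String} {n : String} {j : Nat}
    (hj : PySem.List.index? p n = some j) :
    (PySem.Set.ofList p).idxOf n = (PySem.Set.ofList (p.take j)).length := by
  obtain ⟨pre, suf, hp, hlen, hpre⟩ := (PySem.List.index?_eq_some_iff _ _ _).mp hj
  subst hp
  have htake : (pre ++ n :: suf).take j = pre := by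
    rw [← hlen]; exact List.take_left' rfl
  rw [htake]
  have hofl : PySem.Set.ofList (pre ++ n :: suf)
      = PySem.Set.update (PySem.Set.ofList (pre ++ [n])) suf := by
    have : pre ++ n :: suf = (pre ++ [n]) ++ suf := by simp
    rw [this]
    simp [PySem.Set.ofList_eq_foldl, PySem.Set.update, List.foldl_append]
  rw [hofl, idxOf_update suf _ n (by rw [ofList_append_not_mem hpre]; simp),
      ofList_append_not_mem hpre,
      idxOf_append_self (fun h => hpre ((PySem.Set.mem_ofList _ _).mp h))]

-- B's per-element label agrees with A's mapping value
lemma bLabel_eq (names : List String) (n : String) (hn : n ∈ names) :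
    bLabel names n = (dmOf names).getD n 0 := by
  obtain ⟨j, hj⟩ := Option.isSome_iff_exists.mp
    ((PySem.List.index?_isSome_iff _ _).mpr hn)
  rw [bLabel, hj, Option.getD_some, PySem.List.slice_to_natCast,
      getD_dmOf names n hn, idxOf_ofList_take hj]

-- a dict built from (n, f n) pairs lists the distinct keys in order, each with its f-value
lemma items_ofList_map (f : String → Int) (p : List String) :
    (PySem.Dict.ofList (p.map (fun n => (n, f n)))).items
      = (PySem.List.dedup p).map (fun u => (u, f u)) := by
  induction p using List.reverseRecOn with
  | nil => rfl
  | append_singleton p x ih =>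
    rw [List.map_append, List.map_singleton, dict_ofList_append_singleton]
    have hkeys : (PySem.Dict.ofList (p.map (fun n => (n, f n)))).keys
        = PySem.List.dedup p := by
      simp only [PySem.Dict.keys, ih]
      simp [Function.comp_def]
    have hcont : (PySem.Dict.ofList (p.map (fun n => (n, f n)))).contains x
        = decide (x ∈ p) := by
      rw [PySem.Dict.contains_eq_decide_mem_keys, hkeys]
      simp
    by_cases hx : x ∈ p
    · rw [PySem.Dict.items_insert_of_contains _ _ (by rw [hcont]; simpa),
          ih, List.map_map]
      rw [show PySem.List.dedup (p ++ [x]) = PySem.List.dedup p by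
            simp [PySem.List.dedup_eq_ofList, ofList_append_mem hx]]
      refine List.map_congr_left (fun u _ => ?_)
      by_cases hux : u = x <;> simp [hux]
    · rw [PySem.Dict.items_insert_of_not_contains _ _ (by rw [hcont]; simpa),
          ih]
      rw [show PySem.List.dedup (p ++ [x]) = PySem.List.dedup p ++ [x] by
            simp [PySem.List.dedup_eq_ofList, ofList_append_not_mem hx]]
      simp

-- A's mapping, listed: the distinct names, each with its position
lemma items_dmOf (p : List String) :
    (dmOf p).items
      = (PySem.List.dedup p).map (fun u => (u, ((PySem.Set.ofList p).idxOf u : Int))) := by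
  induction p using List.reverseRecOn with
  | nil => rfl
  | append_singleton p x ih =>
    by_cases hx : x ∈ p
    · rw [dmOf_append_of_mem hx,
          show PySem.List.dedup (p ++ [x]) = PySem.List.dedup p by
            simp [PySem.List.dedup_eq_ofList, ofList_append_mem hx],
          ofList_append_mem hx, ih]
    · rw [dmOf_append_of_not_mem hx,
          PySem.Dict.items_insert_of_not_contains _ _ (by rw [contains_dmOf]; simpa),
          ih, ofList_append_not_mem hx,
          show PySem.List.dedup (p ++ [x]) = PySem.List.dedup p ++ [x] by
            simp [PySem.List.dedup_eq_ofList, ofList_append_not_mem hx],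
          List.map_append]
      congr 1
      · refine List.map_congr_left (fun u hu => ?_)
        have hu' : u ∈ PySem.Set.ofList p := by
          simpa [PySem.List.dedup_eq_ofList] using hu
        rw [List.idxOf_append_of_mem hu']
      · rw [List.map_singleton,
            idxOf_append_self (fun h => hx ((PySem.Set.mem_ofList _ _).mp h))]
        simp [PySem.List.dedup_eq_ofList]

-- ===== VERDICT (by name: the statement is the Claim_ definition above) =====
theorem label_generator_spec : Claim_equal_label_generator := by
  intro names _
  show label_generator names = label_generator_alt names
  rw [label_generator_eq, label_generator_alt]
  have hfst : names.map (fun n => (dmOf names).getD n 0) = names.map (bLabel names) :=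
    List.map_congr_left (fun n hn => (bLabel_eq names n hn).symm)
  have hzip : names.zip (names.map (bLabel names))
      = names.map (fun n => (n, bLabel names n)) :=
    List.map_prod_left_eq_zip.symm
  have hsnd : (PySem.Dict.ofList (names.zip (names.map (bLabel names)))).items
      = (dmOf names).items := by
    rw [hzip,
        show names.map (fun n => (n, bLabel names n))
            = names.map (fun n => (n, (dmOf names).getD n 0)) from
          List.map_congr_left (fun n hn => by rw [bLabel_eq names n hn]),
        items_ofList_map (fun n => (dmOf names).getD n 0) names, items_dmOf]
    refine List.map_congr_left (fun u hu => ?_)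
    rw [getD_dmOf names u (by simpa [PySem.List.mem_dedup] using hu)]
  rw [hfst, ← hsnd]
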